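-- pv_equiv track=rewrite | github.com/ne0npurple/my_CS50_Study | Lecture6-Python/pset6/sentimental-readability/readability.py | get_all_count
-- ===== SOURCE A (Python) =====
-- def get_all_count(text):
--     record = {}
--
--     words = 1
--     sentences = 0
--     letters = 0
--     for word in text:
--         if word.isalpha():
--             letters += 1
--         if word  == " ":
--             words += 1
--         if word == '!' or word == '?' or word == '.':
--             sentences += 1
--
--     record["words"] = words
--     record["sentences"] = sentences
--     record["letters"] = letters
--
--     return record
-- ===== SOURCE B (Python) =====
-- def get_all_count(text):
--     return {
--         "words": text.count(" ") + 1,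
--         "sentences": text.count("!") + text.count("?") + text.count("."),
--         "letters": sum(1 for c in text if c.isalpha()),
--     }
-- ===== Notes on version B (the rewrite author's own statement) =====
-- stated objective: idiomatic
-- what changed: A's single fused loop over the text with three mutable counters and key-by-key dict assignment is replaced by independent per-key computations: library str.count calls for the word and sentence counts and a sum-generator for letters, returned as a dict literal.
import Mathlib
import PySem

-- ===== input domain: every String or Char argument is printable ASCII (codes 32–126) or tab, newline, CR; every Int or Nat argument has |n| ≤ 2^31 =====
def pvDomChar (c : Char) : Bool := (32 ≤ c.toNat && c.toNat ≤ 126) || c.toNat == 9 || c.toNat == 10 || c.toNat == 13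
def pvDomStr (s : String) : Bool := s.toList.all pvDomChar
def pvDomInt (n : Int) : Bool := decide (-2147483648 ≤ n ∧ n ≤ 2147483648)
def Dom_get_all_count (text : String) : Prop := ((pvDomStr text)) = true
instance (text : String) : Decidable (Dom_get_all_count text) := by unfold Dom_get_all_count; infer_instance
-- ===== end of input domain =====

-- B replaces A's single fused counting loop (three mutable counters, dict built by key assignment)
-- with independent per-key computations — library `.count` calls for words/sentences and one
-- comprehension for letters — returned as a dict literal (objective: idiomatic).

-- ===== PORT A =====
def get_all_count (text : String) : List (String × Int) :=
  let record : PySem.Dict String Int := PySem.Dict.empty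
  let st : Int × Int × Int :=
    text.toList.foldl (fun (st : Int × Int × Int) word =>
      let words := st.1
      let sentences := st.2.1
      let letters := st.2.2
      let letters := if PySem.Chars.isalpha word then letters + 1 else letters
      let words := if word == ' ' then words + 1 else words
      let sentences := if word == '!' || word == '?' || word == '.' then sentences + 1 else sentences
      (words, sentences, letters)) (1, 0, 0)
  let record := record.insert "words" st.1
  let record := record.insert "sentences" st.2.1
  let record := record.insert "letters" st.2.2
  record.items

-- ===== PORT B =====
def get_all_count_alt (text : String) : List (String × Int) :=
  [("words", (PySem.Str.count text " " : Int) + 1),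
   ("sentences", (PySem.Str.count text "!" : Int) + (PySem.Str.count text "?" : Int)
                   + (PySem.Str.count text "." : Int)),
   ("letters", ((text.toList.filter (fun c => PySem.Chars.isalpha c)).map
                   (fun _ => (1 : Int))).sum)]

-- ===== PRECONDITION & SPEC =====
def Spec_get_all_count (text : String) (out : List (String × Int)) : Prop := out = get_all_count_alt text
instance (text : String) (out : List (String × Int)) : Decidable (Spec_get_all_count text out) := by unfold Spec_get_all_count; infer_instance

-- ===== CLAIM (what is proved, stated in full; the proofs are below) =====
def Claim_equal_get_all_count : Prop := ∀ (text : String), Dom_get_all_count text → Spec_get_all_count text (get_all_count text)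

-- ===== LEMMAS AND PROOFS =====

-- `s.count(c)` for a single character equals List.count of that character.
theorem chars_count_go_single (c : Char) :
    ∀ (fuel : Nat) (l : List Char) (acc : Nat), l.length ≤ fuel →
      PySem.Chars.count.go [c] fuel l acc = acc + l.count c := by
  intro fuel
  induction fuel with
  | zero =>
    intro l acc h
    have : l = [] := List.eq_nil_of_length_eq_zero (Nat.le_zero.mp h)
    subst this
    simp [PySem.Chars.count.go]
  | succ n ih =>
    intro l acc h
    cases l with
    | nil => simp [PySem.Chars.count.go]
    | cons x t =>
      by_cases hx : c = x
      · subst hx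
        have hp : List.isPrefixOf [c] (c :: t) = true := by
          simp [List.isPrefixOf]
        have hd : List.drop [c].length (c :: t) = t := by simp
        simp only [PySem.Chars.count.go, hp, if_pos, hd]
        rw [ih t (acc + 1) (by simpa using Nat.le_of_succ_le_succ h)]
        simp
        omega
      · have hp : List.isPrefixOf [c] (x :: t) = false := by
          simp [List.isPrefixOf, hx]
        have hxc : x ≠ c := fun h' => hx h'.symm
        simp only [PySem.Chars.count.go, hp, Bool.false_eq_true, if_false]
        rw [ih t acc (by simpa using Nat.le_of_succ_le_succ h)]
        simp [hxc]

theorem chars_count_single (cs : List Char) (c : Char) :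
    PySem.Chars.count cs [c] = cs.count c := by
  simp only [PySem.Chars.count, List.isEmpty]
  exact (chars_count_go_single c cs.length cs 0 le_rfl).trans (by omega)

-- The fused loop of A computes the three independent counts of B.
theorem loopA (l : List Char) (w s le : Int) :
    l.foldl (fun (st : Int × Int × Int) word =>
      let words := st.1
      let sentences := st.2.1
      let letters := st.2.2
      let letters := if PySem.Chars.isalpha word then letters + 1 else letters
      let words := if word == ' ' then words + 1 else words
      let sentences := if word == '!' || word == '?' || word == '.' then sentences + 1 else sentences
      (words, sentences, letters)) (w, s, le)
    = (w + l.count ' ',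
       s + ((l.count '!' : Int) + l.count '?' + l.count '.'),
       le + (l.countP (fun c => PySem.Chars.isalpha c) : Int)) := by
  induction l generalizing w s le with
  | nil => simp
  | cons x t ih =>
    simp only [List.foldl_cons, ih, List.count_cons, List.countP_cons]
    by_cases h1 : x = ' ' <;> by_cases h2 : PySem.Chars.isalpha x = true <;>
      by_cases h3 : x = '!' <;> by_cases h4 : x = '?' <;> by_cases h5 : x = '.' <;>
      simp [h1, h2, h3, h4, h5, Prod.ext_iff] <;> push_cast <;>
      first
        | omega
        | decide
        | (constructor <;> first | omega | decide | (constructor <;> first | omega | decide))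

theorem sum_ones_int {α : Type} (l : List α) :
    (l.map (fun _ => (1 : Int))).sum = (l.length : Int) := by
  induction l with
  | nil => simp
  | cons x t ih => simp [ih]; omega

-- ===== VERDICT (by name: the statement is the Claim_ definition above) =====
theorem get_all_count_spec : Claim_equal_get_all_count := by
  intro text _
  unfold Spec_get_all_count get_all_count get_all_count_alt
  simp only [loopA, PySem.Str.count_eq,
    show (" " : String).toList = [' '] from rfl,
    show ("!" : String).toList = ['!'] from rfl,
    show ("?" : String).toList = ['?'] from rfl,
    show ("." : String).toList = ['.'] from rfl,
    chars_count_single, sum_ones_int, List.countP_eq_length_filter]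
  simp [PySem.Dict.insert, PySem.Dict.empty, PySem.Dict.contains, PySem.Dict.items]
  omega
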